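-- pv_equiv track=rewrite | github.com/Sheikhba/python | Python File/new wok.py | sent
-- ===== SOURCE A (Python) =====
-- def sent (sentence, seperators):
--     if sentence [0] in seperators:
--         word = sentence [0]
--         sentence=sentence[1:]
--         return (word, sentence)
--     word = ""
--     for character in sentence:
--        if character.isalpha():
--            word =word+character
--        else :
--            sentence =sentence[len(word):]
--
--
--            return (word, sentence)
--        if word == sentence:
--             sentence = ""
--     return (word,sentence)
-- ===== SOURCE B (Python) =====
-- def sent(sentence, seperators):
--     if sentence[0] in seperators:
--         return (sentence[0], sentence[1:])
--     i = 0
--     while i < len(sentence) and sentence[i].isalpha():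
--         i += 1
--     return (sentence[:i], sentence[i:])
-- ===== Notes on version B (the rewrite author's own statement) =====
-- stated objective: simpler
-- what changed: B finds the boundary index of the leading alphabetic run with a while loop and slices once, instead of A's accumulating a growing word string with a mid-loop return and a word==sentence reset trick.
-- outside the precondition, e.g. on sent('', ' '): A raises IndexError, B raises IndexError
import Mathlib
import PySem

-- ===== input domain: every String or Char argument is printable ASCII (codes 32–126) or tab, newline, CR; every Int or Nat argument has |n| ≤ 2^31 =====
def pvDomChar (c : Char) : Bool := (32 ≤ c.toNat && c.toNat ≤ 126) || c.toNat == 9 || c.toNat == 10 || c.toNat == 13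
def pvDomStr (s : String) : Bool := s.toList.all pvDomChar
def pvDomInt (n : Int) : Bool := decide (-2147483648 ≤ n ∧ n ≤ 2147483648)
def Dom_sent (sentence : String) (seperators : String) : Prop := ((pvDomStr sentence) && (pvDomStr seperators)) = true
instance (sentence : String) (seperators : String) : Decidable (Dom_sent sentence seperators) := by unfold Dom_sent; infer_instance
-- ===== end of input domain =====

-- B computes the boundary of the leading alphabetic run with an index scan and slices once,
-- instead of A's growing-word accumulation with a mid-loop return (objective: simpler).


-- ===== PORT A =====
-- A's for-loop: `word` accumulates alpha chars, `s` is the current `sentence` variable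
-- (reassigned to [] when word == sentence, sliced on the first non-alpha char).
-- `sentence[len(word):]` with len(word) ≥ 0 is exactly List.drop.
def sentGo : List Char → List Char → List Char → List Char × List Char
  | [], word, s => (word, s)
  | c :: rest, word, s =>
    if PySem.Chars.isalpha c then
      let word' := word ++ [c]
      let s' := if word' = s then [] else s
      sentGo rest word' s'
    else
      (word, s.drop word.length)

def sent (sentence : String) (seperators : String) : String × String :=
  match sentence.toList with
  | [] => ("", "")   -- Python raises IndexError on sentence[0]; excluded by Pre_sent
  | c0 :: rest =>
    -- `sentence[0] in seperators` is a 1-char substring test = char membership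
    if seperators.toList.contains c0 then
      (String.ofList [c0], String.ofList rest)
    else
      let r := sentGo (c0 :: rest) [] (c0 :: rest)
      (String.ofList r.1, String.ofList r.2)

-- ===== PORT B =====
-- B's while loop: i counts leading alphabetic characters.
def sentAltScan : List Char → Nat
  | [] => 0
  | c :: rest => if PySem.Chars.isalpha c then sentAltScan rest + 1 else 0

def sent_alt (sentence : String) (seperators : String) : String × String :=
  match sentence.toList with
  | [] => ("", "")   -- Python raises IndexError on sentence[0]; excluded by Pre_sent
  | c0 :: rest =>
    if seperators.toList.contains c0 then
      (String.ofList [c0], String.ofList rest)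
    else
      let cs := c0 :: rest
      let i := sentAltScan cs
      (String.ofList (cs.take i), String.ofList (cs.drop i))

-- ===== PRECONDITION & SPEC =====
-- Pre_ excludes only the empty sentence, on which A (and B) raise IndexError.
def Pre_sent (sentence : String) (seperators : String) : Prop := sentence ≠ ""
instance (sentence : String) (seperators : String) : Decidable (Pre_sent sentence seperators) := by unfold Pre_sent; infer_instance

def pvWitness_sent : String × String := ("hello world", " ,.")

def Spec_sent (sentence : String) (seperators : String) (out : String × String) : Prop := out = sent_alt sentence seperators
instance (sentence : String) (seperators : String) (out : String × String) : Decidable (Spec_sent sentence seperators out) := by unfold Spec_sent; infer_instance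

-- ===== CLAIM (what is proved, stated in full; the proofs are below) =====
def Claim_equal_sent : Prop := ∀ (sentence : String) (seperators : String), Dom_sent sentence seperators → Pre_sent sentence seperators → Spec_sent sentence seperators (sent sentence seperators)

-- ===== LEMMAS AND PROOFS =====

-- A's loop, started on any suffix `rest` of the current sentence `word ++ rest` (rest nonempty),
-- returns the word extended by the leading alpha run of rest, and the corresponding tail.
theorem sentGo_eq (rest : List Char) : ∀ word : List Char, rest ≠ [] →
    sentGo rest word (word ++ rest) =
      (word ++ rest.takeWhile PySem.Chars.isalpha, rest.dropWhile PySem.Chars.isalpha) := by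
  induction rest with
  | nil => intro word h; exact absurd rfl h
  | cons c rest ih =>
    intro word _
    by_cases hc : PySem.Chars.isalpha c
    · cases rest with
      | nil => simp [sentGo, hc, List.takeWhile, List.dropWhile]
      | cons d rest' =>
        rw [sentGo]
        simp only [hc, if_true]
        have hne : ¬ (word ++ [c] = word ++ c :: d :: rest') := by simp
        rw [if_neg hne]
        have h2 : word ++ c :: d :: rest' = (word ++ [c]) ++ d :: rest' := by simp
        rw [h2, ih (word ++ [c]) (by simp)]
        simp [List.takeWhile, List.dropWhile, hc]
    · simp [sentGo, hc, List.takeWhile, List.dropWhile]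

-- B's scan counts the leading alpha run.
theorem sentAltScan_eq (cs : List Char) :
    sentAltScan cs = (cs.takeWhile PySem.Chars.isalpha).length := by
  induction cs with
  | nil => rfl
  | cons c rest ih =>
    by_cases hc : PySem.Chars.isalpha c <;> simp [sentAltScan, List.takeWhile, hc, ih]

-- take/drop at the length of the leading alpha run give takeWhile/dropWhile.
theorem take_drop_takeWhile_len (cs : List Char) :
    cs.take (cs.takeWhile PySem.Chars.isalpha).length = cs.takeWhile PySem.Chars.isalpha ∧
    cs.drop (cs.takeWhile PySem.Chars.isalpha).length = cs.dropWhile PySem.Chars.isalpha := by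
  induction cs with
  | nil => simp
  | cons c rest ih =>
    by_cases hc : PySem.Chars.isalpha c <;>
      simp [List.takeWhile, List.dropWhile, hc, ih.1, ih.2]

-- ===== VERDICT (by name: the statement is the Claim_ definition above) =====
theorem sent_spec : Claim_equal_sent := by
  intro sentence seperators _ _
  unfold Spec_sent sent sent_alt
  cases h : sentence.toList with
  | nil => rfl
  | cons c0 rest =>
    by_cases hs : c0 ∈ seperators.toList
    · simp [hs]
    · have hgo := sentGo_eq (c0 :: rest) [] (by simp)
      simp only [List.nil_append] at hgo
      simp [hs, hgo, sentAltScan_eq, (take_drop_takeWhile_len (c0 :: rest)).1,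
        (take_drop_takeWhile_len (c0 :: rest)).2]
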